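-- pv_equiv track=rewrite | github.com/jguida941/ci-cd-hub | cihub/services/report_validator.py | _parse_summary_tools
-- ===== SOURCE A (Python) =====
-- def _parse_bool(value: str) -> bool | None:
--     normalized = value.strip().lower()
--     if normalized in {"true", "yes", "1"}:
--         return True
--     if normalized in {"false", "no", "0"}:
--         return False
--     return None
--
-- def _parse_summary_tools(
--     summary_text: str,
-- ) -> tuple[dict[str, bool], dict[str, bool], dict[str, bool]]:
--     """Parse Tools Enabled table, returning (configured, ran, success) dicts."""
--     lines = summary_text.splitlines()
--     in_tools = False
--     configured: dict[str, bool] = {}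
--     ran: dict[str, bool] = {}
--     success: dict[str, bool] = {}
--     for line in lines:
--         if line.strip() == "## Tools Enabled":
--             in_tools = True
--             continue
--         if in_tools and line.startswith("## "):
--             break
--         if not in_tools:
--             continue
--         if "|" not in line:
--             continue
--         if line.strip().startswith("|---"):
--             continue
--         cells = [cell.strip() for cell in line.strip().strip("|").split("|")]
--         if len(cells) < 3:
--             continue
--         if cells[1].lower() == "tool" or cells[2].lower() in ("enabled", "configured"):
--             continue
--         tool = cells[1]
--         if len(cells) >= 5:
--             conf_val = _parse_bool(cells[2])
--             ran_val = _parse_bool(cells[3])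
--             success_val = _parse_bool(cells[4])
--             if conf_val is not None:
--                 configured[tool] = conf_val
--             if ran_val is not None:
--                 ran[tool] = ran_val
--             if success_val is not None:
--                 success[tool] = success_val
--         elif len(cells) >= 4:
--             conf_val = _parse_bool(cells[2])
--             ran_val = _parse_bool(cells[3])
--             if conf_val is not None:
--                 configured[tool] = conf_val
--             if ran_val is not None:
--                 ran[tool] = ran_val
--                 success[tool] = ran_val
--         else:
--             enabled = _parse_bool(cells[2])
--             if enabled is not None:
--                 configured[tool] = enabled
--                 ran[tool] = enabled
--                 success[tool] = enabled
--     return configured, ran, success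
-- ===== SOURCE B (Python) =====
-- from itertools import dropwhile, takewhile
--
--
-- def _parse_bool(value: str) -> bool | None:
--     normalized = value.strip().lower()
--     if normalized in {"true", "yes", "1"}:
--         return True
--     if normalized in {"false", "no", "0"}:
--         return False
--     return None
--
--
-- _HEADER = "## Tools Enabled"
--
--
-- def _row_updates(line):
--     """Pure per-row parse: a list of (slot, tool, value) updates, slot in 'crs'."""
--     if "|" not in line:
--         return []
--     if line.strip().startswith("|---"):
--         return []
--     cells = [c.strip() for c in line.strip().strip("|").split("|")]
--     if len(cells) < 3:
--         return []
--     if cells[1].lower() == "tool" or cells[2].lower() in ("enabled", "configured"):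
--         return []
--     tool = cells[1]
--     if len(cells) >= 5:
--         srcs = (cells[2], cells[3], cells[4])
--     elif len(cells) == 4:
--         srcs = (cells[2], cells[3], cells[3])
--     else:
--         srcs = (cells[2], cells[2], cells[2])
--     return [(slot, tool, v)
--             for slot, src in zip("crs", srcs)
--             for v in [_parse_bool(src)] if v is not None]
--
--
-- def _parse_summary_tools(
--     summary_text: str,
-- ) -> tuple[dict[str, bool], dict[str, bool], dict[str, bool]]:
--     """Parse Tools Enabled table, returning (configured, ran, success) dicts."""
--     lines = summary_text.splitlines()
--     it = dropwhile(lambda l: l.strip() != _HEADER, lines)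
--     next(it, None)  # consume the header line itself (no-op if absent)
--     section = takewhile(
--         lambda l: not (l.startswith("## ") and l.strip() != _HEADER), it)
--     updates = [u for line in section for u in _row_updates(line)]
--     configured = {t: v for s, t, v in updates if s == "c"}
--     ran = {t: v for s, t, v in updates if s == "r"}
--     success = {t: v for s, t, v in updates if s == "s"}
--     return configured, ran, success
-- ===== Notes on version B (the rewrite author's own statement) =====
-- stated objective: alternative
-- what changed: Replaces A's single stateful scan (in_tools flag with continue/break, three dicts mutated inside the loop) by a staged pipeline: itertools dropwhile/takewhile extract the section, a pure per-row function emits a flat (slot, tool, value) update stream with a uniform source-triple for the 3/4/5-cell cases, and each result dict is a comprehension filtering that stream by slot.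
import Mathlib
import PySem

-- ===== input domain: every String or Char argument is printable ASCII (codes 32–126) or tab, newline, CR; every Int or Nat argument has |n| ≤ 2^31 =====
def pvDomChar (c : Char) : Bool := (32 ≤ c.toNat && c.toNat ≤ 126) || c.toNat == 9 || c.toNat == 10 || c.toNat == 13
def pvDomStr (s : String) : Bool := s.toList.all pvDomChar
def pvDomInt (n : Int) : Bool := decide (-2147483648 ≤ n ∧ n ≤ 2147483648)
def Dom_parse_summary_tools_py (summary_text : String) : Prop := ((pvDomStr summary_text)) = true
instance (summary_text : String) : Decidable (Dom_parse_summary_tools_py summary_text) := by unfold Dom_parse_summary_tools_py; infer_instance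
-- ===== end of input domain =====

-- B replaces A's single stateful scan (in_tools flag, continue/break, three dicts mutated in
-- step) by a staged pipeline: dropwhile/takewhile section extraction, a pure per-row function
-- producing a flat (slot, tool, value) update stream, and three dict comprehensions filtering
-- that stream (objective: alternative decomposition); same return value, proved equal.


-- shared helper: Python's _parse_bool (identical in Source A and Source B)
def pvParseBool (value : String) : Option Bool :=
  let normalized := PySem.Str.lower (PySem.Str.strip value)
  if normalized == "true" || normalized == "yes" || normalized == "1" then some true
  else if normalized == "false" || normalized == "no" || normalized == "0" then some false
  else none

-- shared helper: the cells list of a row (identical expression in Source A and Source B):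
-- [cell.strip() for cell in line.strip().strip("|").split("|")]
-- split? is none only for an empty separator; "|" is non-empty, so getD [] is never taken
def pvCells (line : String) : List String :=
  ((PySem.Str.split? (PySem.Str.stripChars (PySem.Str.strip line) "|") "|").getD []).map
    PySem.Str.strip

-- ===== PORT A =====
-- A's per-row body mutating the three dicts (the inside of A's loop after the flag checks)
def pvRow (line : String)
    (st : PySem.Dict String Bool × PySem.Dict String Bool × PySem.Dict String Bool) :
    PySem.Dict String Bool × PySem.Dict String Bool × PySem.Dict String Bool :=
  if !(PySem.Str.isIn "|" line) then st
  else if PySem.Str.startswith (PySem.Str.strip line) "|---" then st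
  else if (pvCells line).length < 3 then st
  else if PySem.Str.lower ((pvCells line).getD 1 "") == "tool"
      || PySem.Str.lower ((pvCells line).getD 2 "") == "enabled"
      || PySem.Str.lower ((pvCells line).getD 2 "") == "configured" then st
  else
      let cells := pvCells line
      let tool := cells.getD 1 ""
      if 5 ≤ cells.length then
        let conf_val := pvParseBool (cells[2]?.getD "")
        let ran_val := pvParseBool (cells[3]?.getD "")
        let success_val := pvParseBool (cells[4]?.getD "")
        let d1 := match conf_val with | some b => st.1.insert tool b | none => st.1
        let d2 := match ran_val with | some b => st.2.1.insert tool b | none => st.2.1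
        let d3 := match success_val with | some b => st.2.2.insert tool b | none => st.2.2
        (d1, d2, d3)
      else if 4 ≤ cells.length then
        let conf_val := pvParseBool (cells[2]?.getD "")
        let ran_val := pvParseBool (cells[3]?.getD "")
        let d1 := match conf_val with | some b => st.1.insert tool b | none => st.1
        match ran_val with
        | some b => (d1, st.2.1.insert tool b, st.2.2.insert tool b)
        | none => (d1, st.2.1, st.2.2)
      else
        match pvParseBool (cells[2]?.getD "") with
        | some b => (st.1.insert tool b, st.2.1.insert tool b, st.2.2.insert tool b)
        | none => st

-- A's single pass: in_tools flag, continue after the header, break at the next heading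
def pvLoopA (lines : List String) (in_tools : Bool)
    (st : PySem.Dict String Bool × PySem.Dict String Bool × PySem.Dict String Bool) :
    PySem.Dict String Bool × PySem.Dict String Bool × PySem.Dict String Bool :=
  match lines with
  | [] => st
  | line :: rest =>
    if PySem.Str.strip line == "## Tools Enabled" then pvLoopA rest true st
    else if in_tools && PySem.Str.startswith line "## " then st
    else if !in_tools then pvLoopA rest in_tools st
    else pvLoopA rest in_tools (pvRow line st)

def parse_summary_tools_py (summary_text : String) :
    (List (String × Bool)) × (List (String × Bool)) × (List (String × Bool)) :=
  let st := pvLoopA (PySem.Str.splitlines summary_text) false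
    (PySem.Dict.empty, PySem.Dict.empty, PySem.Dict.empty)
  (st.1.items, st.2.1.items, st.2.2.items)

-- ===== PORT B =====
-- Source B's _row_updates: pure per-row parse into a flat list of (slot, tool, value) updates
def pvRowUpdates (line : String) : List (Char × String × Bool) :=
  if !(PySem.Str.isIn "|" line) then []
  else if PySem.Str.startswith (PySem.Str.strip line) "|---" then []
  else if (pvCells line).length < 3 then []
  else if PySem.Str.lower ((pvCells line).getD 1 "") == "tool"
      || PySem.Str.lower ((pvCells line).getD 2 "") == "enabled"
      || PySem.Str.lower ((pvCells line).getD 2 "") == "configured" then []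
  else
    let cells := pvCells line
    let tool := cells.getD 1 ""
    let srcs : String × String × String :=
          if 5 ≤ cells.length then (cells.getD 2 "", cells.getD 3 "", cells.getD 4 "")
          else if cells.length == 4 then (cells.getD 2 "", cells.getD 3 "", cells.getD 3 "")
          else (cells.getD 2 "", cells.getD 2 "", cells.getD 2 "")
    [('c', srcs.1), ('r', srcs.2.1), ('s', srcs.2.2)].flatMap
      (fun sl => match pvParseBool sl.2 with
        | some v => [(sl.1, tool, v)]
        | none => [])

-- Source B's pipeline: dropwhile to the header, consume it, takewhile to the next heading,
-- flatten the per-row update streams, then one dict comprehension per slot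
def parse_summary_tools_py_alt (summary_text : String) :
    (List (String × Bool)) × (List (String × Bool)) × (List (String × Bool)) :=
  let lines := PySem.Str.splitlines summary_text
  let rest := (lines.dropWhile (fun l => !(PySem.Str.strip l == "## Tools Enabled"))).drop 1
  let sect := rest.takeWhile
    (fun l => !(PySem.Str.startswith l "## " && !(PySem.Str.strip l == "## Tools Enabled")))
  let updates := sect.flatMap pvRowUpdates
  let configured := (updates.filter (fun u => u.1 == 'c')).foldl
    (fun d u => d.insert u.2.1 u.2.2) (PySem.Dict.empty : PySem.Dict String Bool)
  let ran := (updates.filter (fun u => u.1 == 'r')).foldl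
    (fun d u => d.insert u.2.1 u.2.2) (PySem.Dict.empty : PySem.Dict String Bool)
  let success := (updates.filter (fun u => u.1 == 's')).foldl
    (fun d u => d.insert u.2.1 u.2.2) (PySem.Dict.empty : PySem.Dict String Bool)
  (configured.items, ran.items, success.items)

-- ===== PRECONDITION & SPEC =====
def Spec_parse_summary_tools_py (summary_text : String) (out : (List (String × Bool)) × (List (String × Bool)) × (List (String × Bool))) : Prop := out = parse_summary_tools_py_alt summary_text
instance (summary_text : String) (out : (List (String × Bool)) × (List (String × Bool)) × (List (String × Bool))) : Decidable (Spec_parse_summary_tools_py summary_text out) := by unfold Spec_parse_summary_tools_py; infer_instance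

-- ===== CLAIM (what is proved, stated in full; the proofs are below) =====
def Claim_equal_parse_summary_tools_py : Prop := ∀ (summary_text : String), Dom_parse_summary_tools_py summary_text → Spec_parse_summary_tools_py summary_text (parse_summary_tools_py summary_text)

-- ===== LEMMAS AND PROOFS =====

-- proof-side helper: apply one (slot, tool, value) update to the state triple
def pvApplyUpdate
    (st : PySem.Dict String Bool × PySem.Dict String Bool × PySem.Dict String Bool)
    (u : Char × String × Bool) :
    PySem.Dict String Bool × PySem.Dict String Bool × PySem.Dict String Bool :=
  if u.1 == 'c' then (st.1.insert u.2.1 u.2.2, st.2.1, st.2.2)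
  else if u.1 == 'r' then (st.1, st.2.1.insert u.2.1 u.2.2, st.2.2)
  else if u.1 == 's' then (st.1, st.2.1, st.2.2.insert u.2.1 u.2.2)
  else st

-- the len(cells) 3/4/5 branch of A equals folding B's uniform slot/src update stream
theorem pv_branch_eq (cells : List String) (st :
    PySem.Dict String Bool × PySem.Dict String Bool × PySem.Dict String Bool)
    (h3 : ¬ cells.length < 3) :
    (let tool := cells.getD 1 "";
      if 5 ≤ cells.length then
        let conf_val := pvParseBool (cells[2]?.getD "")
        let ran_val := pvParseBool (cells[3]?.getD "")
        let success_val := pvParseBool (cells[4]?.getD "")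
        let d1 := match conf_val with | some b => st.1.insert tool b | none => st.1
        let d2 := match ran_val with | some b => st.2.1.insert tool b | none => st.2.1
        let d3 := match success_val with | some b => st.2.2.insert tool b | none => st.2.2
        (d1, d2, d3)
      else if 4 ≤ cells.length then
        let conf_val := pvParseBool (cells[2]?.getD "")
        let ran_val := pvParseBool (cells[3]?.getD "")
        let d1 := match conf_val with | some b => st.1.insert tool b | none => st.1
        match ran_val with
        | some b => (d1, st.2.1.insert tool b, st.2.2.insert tool b)
        | none => (d1, st.2.1, st.2.2)
      else
        match pvParseBool (cells[2]?.getD "") with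
        | some b => (st.1.insert tool b, st.2.1.insert tool b, st.2.2.insert tool b)
        | none => st)
    = (let tool := cells.getD 1 "";
       let srcs : String × String × String :=
          if 5 ≤ cells.length then (cells.getD 2 "", cells.getD 3 "", cells.getD 4 "")
          else if cells.length == 4 then (cells.getD 2 "", cells.getD 3 "", cells.getD 3 "")
          else (cells.getD 2 "", cells.getD 2 "", cells.getD 2 "");
       ([('c', srcs.1), ('r', srcs.2.1), ('s', srcs.2.2)].flatMap
          (fun sl => match pvParseBool sl.2 with
            | some v => [(sl.1, tool, v)]
            | none => []))).foldl pvApplyUpdate st := by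
  by_cases h5 : 5 ≤ cells.length
  · simp only [h5, if_pos]
    cases hc : pvParseBool (cells[2]?.getD "") <;> cases hr : pvParseBool (cells[3]?.getD "") <;>
      cases hs : pvParseBool (cells[4]?.getD "") <;>
      simp [pvApplyUpdate, List.flatMap, hc, hr, hs]
  · by_cases h4 : cells.length = 4
    · have h4a : 4 ≤ cells.length := by omega
      have h4b : (cells.length == 4) = true := by simp [h4]
      simp only [h5, if_false, h4a, if_pos, h4b]
      cases hc : pvParseBool (cells[2]?.getD "") <;> cases hr : pvParseBool (cells[3]?.getD "") <;>
        simp [pvApplyUpdate, List.flatMap, hc, hr]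
    · have h4a : ¬ 4 ≤ cells.length := by omega
      have h4b : (cells.length == 4) = false := by simp [h4]
      simp only [h5, h4a, if_false, h4b]
      cases hc : pvParseBool (cells[2]?.getD "") <;> simp [pvApplyUpdate, List.flatMap, hc]

-- A's row body equals folding B's update stream for that row
theorem pv_row_eq_updates (line : String) (st) :
    pvRow line st = (pvRowUpdates line).foldl pvApplyUpdate st := by
  unfold pvRow pvRowUpdates
  by_cases h1 : (!PySem.Str.isIn "|" line) = true
  · rw [if_pos h1, if_pos h1]; rfl
  · rw [if_neg h1, if_neg h1]
    by_cases h2 : PySem.Str.startswith (PySem.Str.strip line) "|---" = true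
    · rw [if_pos h2, if_pos h2]; rfl
    · rw [if_neg h2, if_neg h2]
      by_cases h3 : (pvCells line).length < 3
      · rw [if_pos h3, if_pos h3]; rfl
      · rw [if_neg h3, if_neg h3]
        by_cases h4 : (PySem.Str.lower ((pvCells line).getD 1 "") == "tool"
            || PySem.Str.lower ((pvCells line).getD 2 "") == "enabled"
            || PySem.Str.lower ((pvCells line).getD 2 "") == "configured") = true
        · rw [if_pos h4, if_pos h4]; rfl
        · rw [if_neg h4, if_neg h4]
          exact pv_branch_eq (pvCells line) st h3

-- a member that the predicate rejects survives dropWhile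
theorem pv_mem_dropWhile {c : Char} {p : Char → Bool} {l : List Char}
    (hc : c ∈ l) (hp : p c = false) : c ∈ l.dropWhile p := by
  induction l with
  | nil => cases hc
  | cons a l ih =>
    rw [List.dropWhile_cons]
    rcases List.mem_cons.mp hc with h | h
    · subst h; simp [hp]
    · split
      · exact ih h
      · exact List.mem_cons_of_mem _ h

theorem pv_mem_strip {c : Char} {l : List Char}
    (hc : c ∈ l) (hp : PySem.Chars.isspace c = false) : c ∈ PySem.Chars.strip l := by
  unfold PySem.Chars.strip PySem.Chars.lstrip PySem.Chars.rstrip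
  exact List.mem_reverse.mpr
    (pv_mem_dropWhile (List.mem_reverse.mpr (pv_mem_dropWhile hc hp)) hp)

-- a line whose strip() is the header contains no '|'
theorem pv_header_no_bar (line : String)
    (h : PySem.Str.strip line = "## Tools Enabled") : PySem.Str.isIn "|" line = false := by
  cases hin : PySem.Str.isIn "|" line
  · rfl
  · exfalso
    rw [PySem.Str.isIn_eq] at hin
    have hinf : "|".toList <:+: line.toList := (PySem.Chars.isIn_iff_infix _ _).mp hin
    have hmem : '|' ∈ line.toList := (List.singleton_infix_iff '|' line.toList).mp hinf
    have hs : '|' ∈ PySem.Chars.strip line.toList := pv_mem_strip hmem (by decide)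
    rw [← PySem.Str.toList_strip, h] at hs
    simp at hs

-- hence A's row body ignores a header line, and B's update stream for it is empty
theorem pv_row_header (line : String)
    (h : PySem.Str.strip line = "## Tools Enabled") (st) : pvRow line st = st := by
  have hb : PySem.Chars.isIn ['|'] line.toList = false := by
    simpa using pv_header_no_bar line h
  unfold pvRow
  simp [hb]

-- A's loop before the header = Source B's dropwhile-then-consume-one phase
theorem pv_loopA_false (lines : List String) (st) :
    pvLoopA lines false st =
      pvLoopA ((lines.dropWhile (fun l => !(PySem.Str.strip l == "## Tools Enabled"))).drop 1)
        true st := by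
  induction lines with
  | nil => rfl
  | cons line rest ih =>
    simp only [pvLoopA, List.dropWhile_cons]
    by_cases h : PySem.Str.strip line = "## Tools Enabled"
    · simp [h]
    · simp [h, ih]

-- A's loop after the header = a fold over Source B's takewhile section
theorem pv_loopA_true (lines : List String) (st) :
    pvLoopA lines true st =
      (lines.takeWhile
          (fun l => !(PySem.Str.startswith l "## " && !(PySem.Str.strip l == "## Tools Enabled")))).foldl
        (fun st line => pvRow line st) st := by
  induction lines generalizing st with
  | nil => rfl
  | cons line rest ih =>
    simp only [pvLoopA, List.takeWhile_cons]
    by_cases h : PySem.Str.strip line = "## Tools Enabled"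
    · simp [h, ih, pv_row_header line h]
    · by_cases h2 : PySem.Str.startswith line "## " = true
      · have h2c : PySem.Chars.startswith line.toList ['#','#',' '] = true := by simpa using h2
        simp [h, h2c]
      · have h2c : PySem.Chars.startswith line.toList ['#','#',' '] = false := by
          simpa using h2
        simp [h, h2c, ih]

-- folding A's row bodies over the section = folding the flattened update stream
theorem pv_fold_rows (l : List String)
    (st : PySem.Dict String Bool × PySem.Dict String Bool × PySem.Dict String Bool) :
    l.foldl (fun st line => pvRow line st) st =
      (l.flatMap pvRowUpdates).foldl pvApplyUpdate st := by
  induction l generalizing st with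
  | nil => rfl
  | cons a l ih =>
    rw [List.foldl_cons, pv_row_eq_updates, List.flatMap_cons, List.foldl_append, ih]

-- the update fold, componentwise: each dict is the fold of the updates filtered to its slot
theorem pv_fold_components (us : List (Char × String × Bool))
    (st : PySem.Dict String Bool × PySem.Dict String Bool × PySem.Dict String Bool) :
    us.foldl pvApplyUpdate st =
      ((us.filter (fun u => u.1 == 'c')).foldl (fun d u => d.insert u.2.1 u.2.2) st.1,
       (us.filter (fun u => u.1 == 'r')).foldl (fun d u => d.insert u.2.1 u.2.2) st.2.1,
       (us.filter (fun u => u.1 == 's')).foldl (fun d u => d.insert u.2.1 u.2.2) st.2.2) := by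
  induction us generalizing st with
  | nil => rfl
  | cons u us ih =>
    simp only [List.foldl_cons, List.filter_cons, ih]
    by_cases hc : u.1 = 'c'
    · simp [pvApplyUpdate, hc]
    · by_cases hr : u.1 = 'r'
      · simp [pvApplyUpdate, hr]
      · by_cases hs : u.1 = 's'
        · simp [pvApplyUpdate, hs]
        · simp [pvApplyUpdate, hc, hr, hs]

-- ===== VERDICT (by name: the statement is the Claim_ definition above) =====
theorem parse_summary_tools_py_spec : Claim_equal_parse_summary_tools_py := by
  intro s _
  unfold Spec_parse_summary_tools_py parse_summary_tools_py parse_summary_tools_py_alt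
  rw [pv_loopA_false, pv_loopA_true, pv_fold_rows, pv_fold_components]
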